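-- pv_equiv track=rewrite | github.com/sallyklpoon/leetcode-carnival | LeetCode/Easy/2032_Two_Out_of_Three/2032_two_out_of_three.py | two_out_of_three_v1
-- ===== SOURCE A (Python) =====
-- def two_out_of_three_v1(nums1: list, nums2: list, nums3: list) -> list:
--     """
--     Return a list of numbers that exist in at least two of three given lists.
--
--     Manual process.
--     Time Complexity: O(N)
--     Space Complexity: O(N) using an extra hashmap
--
--     :param nums1: a list of int
--     :param nums2: a list of int
--     :param nums3: a list of int
--     :return: a list of int
--     """
--     map1 = dict()
--     output = []
--
--     for num in nums1:
--         map1[num] = 1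
--
--     for num in nums2:
--         if num in map1:
--             map1[num] = -1 if abs(map1[num]) == 1 else 2
--         else:
--             map1[num] = 2
--
--     for num in nums3:
--         if num in map1:
--             map1[num] = -1
--
--     for key, value in map1.items():
--         if value == -1:
--             output.append(key)
--
--     return output
-- ===== SOURCE B (Python) =====
-- def two_out_of_three_v1(nums1: list, nums2: list, nums3: list) -> list:
--     s1, s2, s3 = set(nums1), set(nums2), set(nums3)
--     return [num for num in dict.fromkeys(nums1 + nums2)
--             if (num in s1) + (num in s2) + (num in s3) >= 2]
-- ===== Notes on version B (the rewrite author's own statement) =====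
-- stated objective: simpler
-- what changed: Replaces A's single-dict value-encoding state machine (1/-1/2 codes mutated across three loops) with three plain sets and an explicit membership count over an ordered dedup of nums1+nums2.
import Mathlib
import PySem

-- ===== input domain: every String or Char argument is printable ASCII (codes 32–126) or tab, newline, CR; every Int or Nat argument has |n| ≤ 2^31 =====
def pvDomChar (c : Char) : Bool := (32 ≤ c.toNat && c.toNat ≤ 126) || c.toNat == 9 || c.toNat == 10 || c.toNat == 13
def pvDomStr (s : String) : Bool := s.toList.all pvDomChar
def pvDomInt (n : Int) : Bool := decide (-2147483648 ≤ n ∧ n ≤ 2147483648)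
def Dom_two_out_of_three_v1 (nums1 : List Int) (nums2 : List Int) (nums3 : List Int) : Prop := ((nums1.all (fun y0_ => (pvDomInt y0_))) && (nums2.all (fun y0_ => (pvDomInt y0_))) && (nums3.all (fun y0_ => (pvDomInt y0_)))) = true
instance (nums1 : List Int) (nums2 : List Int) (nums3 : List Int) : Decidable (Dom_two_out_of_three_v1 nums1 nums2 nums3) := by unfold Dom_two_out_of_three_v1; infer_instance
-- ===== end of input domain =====

-- ===== PORT A =====
-- Literal port of A: one dict, three mutation loops (1 / -1 / 2 value codes), then
-- collect keys whose value is -1 in dict insertion order.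
def two_out_of_three_v1 (nums1 : List Int) (nums2 : List Int) (nums3 : List Int) : List Int :=
  let map1 : PySem.Dict Int Int :=
    nums1.foldl (fun d num => d.insert num 1) PySem.Dict.empty
  let map1 :=
    nums2.foldl (fun d num =>
      if d.contains num then
        d.insert num (if (d.getD num 0).natAbs == 1 then -1 else 2)
      else
        d.insert num 2) map1
  let map1 :=
    nums3.foldl (fun d num =>
      if d.contains num then d.insert num (-1) else d) map1
  map1.items.foldl (fun output kv => if kv.2 == -1 then output ++ [kv.1] else output) []

-- ===== PORT B =====
-- Port of B: three sets, iterate the ordered dedup of nums1+nums2, keep numbers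
-- whose membership count over the three sets is at least 2.
def two_out_of_three_v1_alt (nums1 : List Int) (nums2 : List Int) (nums3 : List Int) : List Int :=
  let s1 : PySem.Set Int := PySem.Set.ofList nums1
  let s2 : PySem.Set Int := PySem.Set.ofList nums2
  let s3 : PySem.Set Int := PySem.Set.ofList nums3
  (PySem.List.dedup (nums1 ++ nums2)).filter (fun num =>
    decide (2 ≤ (if num ∈ s1 then (1 : Int) else 0) + (if num ∈ s2 then 1 else 0)
               + (if num ∈ s3 then 1 else 0)))

-- ===== PRECONDITION & SPEC =====
def Spec_two_out_of_three_v1 (nums1 : List Int) (nums2 : List Int) (nums3 : List Int) (out : List Int) : Prop := out = two_out_of_three_v1_alt nums1 nums2 nums3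
instance (nums1 : List Int) (nums2 : List Int) (nums3 : List Int) (out : List Int) : Decidable (Spec_two_out_of_three_v1 nums1 nums2 nums3 out) := by unfold Spec_two_out_of_three_v1; infer_instance

-- ===== CLAIM (what is proved, stated in full; the proofs are below) =====
def Claim_equal_two_out_of_three_v1 : Prop := ∀ (nums1 : List Int) (nums2 : List Int) (nums3 : List Int), Dom_two_out_of_three_v1 nums1 nums2 nums3 → Spec_two_out_of_three_v1 nums1 nums2 nums3 (two_out_of_three_v1 nums1 nums2 nums3)

-- ===== LEMMAS AND PROOFS =====

-- step function of A's second loop, as a value transformer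
def pvStep2 (v : Int) : Int := if v.natAbs == 1 then -1 else 2

lemma pvStep2_idem (v : Int) : pvStep2 (pvStep2 v) = pvStep2 v := by
  unfold pvStep2; split_ifs with h1 <;> simp_all

-- Loop 1: value view
lemma loop1_getD (l : List Int) : ∀ (d : PySem.Dict Int Int) (k : Int),
    (l.foldl (fun d num => d.insert num 1) d).getD k 0
      = if k ∈ l then 1 else d.getD k 0 := by
  induction l with
  | nil => simp
  | cons x xs ih =>
    intro d k
    simp only [List.foldl_cons, ih, PySem.Dict.getD_insert, List.mem_cons]
    split_ifs <;> simp_all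

-- Loop 2 rewritten: both branches insert at num
lemma loop2_fn_eq :
    (fun (d : PySem.Dict Int Int) num =>
      if d.contains num then
        d.insert num (if (d.getD num 0).natAbs == 1 then -1 else 2)
      else d.insert num 2)
    = (fun (d : PySem.Dict Int Int) num =>
      d.insert num (if d.contains num then pvStep2 (d.getD num 0) else 2)) := by
  funext d num; unfold pvStep2; split_ifs <;> rfl

-- Loop 2: value view, under the invariant 'contains ↔ value ≠ 0'
lemma loop2_getD (l : List Int) : ∀ (d : PySem.Dict Int Int),
    (∀ j, d.contains j = true ↔ d.getD j 0 ≠ 0) → ∀ k,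
    (l.foldl (fun d num =>
        d.insert num (if d.contains num then pvStep2 (d.getD num 0) else 2)) d).getD k 0
      = if k ∈ l then pvStep2 (d.getD k 0) else d.getD k 0 := by
  induction l with
  | nil => simp
  | cons x xs ih =>
    intro d hd k
    have hx : (if d.contains x then pvStep2 (d.getD x 0) else 2) = pvStep2 (d.getD x 0) := by
      by_cases hc : d.contains x = true
      · simp [hc]
      · have h0 : d.getD x 0 = 0 := by
          by_contra h; exact hc ((hd x).mpr h)
        simp [hc, h0, pvStep2]
    have hinv : ∀ j, (d.insert x (pvStep2 (d.getD x 0))).contains j = true ↔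
        (d.insert x (pvStep2 (d.getD x 0))).getD j 0 ≠ 0 := by
      intro j
      by_cases hjx : j = x
      · subst hjx
        simp [PySem.Dict.contains_insert_self, PySem.Dict.getD_insert_self, pvStep2]
        split_ifs <;> simp
      · rw [PySem.Dict.getD_insert_of_ne _ _ _ hjx]
        rw [show (d.insert x (pvStep2 (d.getD x 0))).contains j
              = (j == x || d.contains j) from PySem.Dict.contains_insert _ _ _ _]
        simp [hjx, hd j]
    simp only [List.foldl_cons, hx, ih _ hinv, PySem.Dict.getD_insert, List.mem_cons]
    by_cases h1 : k ∈ xs <;> by_cases h2 : k = x <;>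
      simp [h1, h2, pvStep2_idem]

lemma loop3_keys (l : List Int) : ∀ (d : PySem.Dict Int Int),
    (l.foldl (fun d num => if d.contains num then d.insert num (-1) else d) d).keys
      = d.keys := by
  induction l with
  | nil => simp
  | cons x xs ih =>
    intro d
    simp only [List.foldl_cons]
    by_cases hc : d.contains x = true
    · rw [if_pos hc, ih, PySem.Dict.keys_insert_of_contains _ _ hc]
    · rw [if_neg hc, ih]

-- Loop 3: value view
lemma loop3_getD (l : List Int) : ∀ (d : PySem.Dict Int Int) (k : Int),
    (l.foldl (fun d num => if d.contains num then d.insert num (-1) else d) d).getD k 0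
      = if k ∈ l ∧ d.contains k = true then -1 else d.getD k 0 := by
  induction l with
  | nil => simp
  | cons x xs ih =>
    intro d k
    simp only [List.foldl_cons]
    by_cases hc : d.contains x = true
    · rw [if_pos hc, ih]
      have hcont : ∀ j, (d.insert x (-1)).contains j = (j == x || d.contains j) :=
        fun j => PySem.Dict.contains_insert _ _ _ _
      simp only [hcont, PySem.Dict.getD_insert, List.mem_cons]
      by_cases h1 : k ∈ xs <;> by_cases h2 : k = x <;> simp [h1, h2, hc]
    · rw [if_neg hc, ih]
      simp only [List.mem_cons]
      by_cases h1 : k ∈ xs <;> by_cases h2 : k = x <;> simp_all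

-- ===== VERDICT (by name: the statement is the Claim_ definition above) =====
set_option maxHeartbeats 1000000 in
theorem two_out_of_three_v1_spec : Claim_equal_two_out_of_three_v1 := by
  intro nums1 nums2 nums3 _
  unfold Spec_two_out_of_three_v1 two_out_of_three_v1 two_out_of_three_v1_alt
  simp only []
  -- the three dict states
  set m1 : PySem.Dict Int Int :=
    nums1.foldl (fun d num => d.insert num 1) PySem.Dict.empty with hm1
  set m2 : PySem.Dict Int Int :=
    nums2.foldl (fun d num =>
      if d.contains num then
        d.insert num (if (d.getD num 0).natAbs == 1 then -1 else 2)
      else d.insert num 2) m1 with hm2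
  set m3 : PySem.Dict Int Int :=
    nums3.foldl (fun d num =>
      if d.contains num then d.insert num (-1) else d) m2 with hm3
  -- keys
  have hk1 : m1.keys = PySem.Set.ofList nums1 := by
    rw [hm1, PySem.Dict.keys_foldl_insert]
    simp [PySem.Dict.keys_empty, PySem.Set.update_nil_left]
  have hk2 : m2.keys = PySem.Set.ofList (nums1 ++ nums2) := by
    rw [hm2, loop2_fn_eq, PySem.Dict.keys_foldl_insert, hk1,
        PySem.Set.ofList_append]
  have hk3 : m3.keys = PySem.Set.ofList (nums1 ++ nums2) := by
    rw [hm3, loop3_keys, hk2]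
  have hnd3 : m3.keys.Nodup := by rw [hk3]; exact PySem.Set.nodup_ofList _
  -- values
  have hv1 : ∀ k, m1.getD k 0 = if k ∈ nums1 then 1 else 0 := by
    intro k; rw [hm1, loop1_getD]; simp [PySem.Dict.getD_empty]
  have hc1 : ∀ j, m1.contains j = true ↔ m1.getD j 0 ≠ 0 := by
    intro j
    rw [PySem.Dict.contains_iff_mem_keys, hk1, PySem.Set.mem_ofList, hv1]
    split_ifs with h <;> simp [h]
  have hv2 : ∀ k, m2.getD k 0
      = if k ∈ nums2 then pvStep2 (m1.getD k 0) else m1.getD k 0 := by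
    intro k; rw [hm2, loop2_fn_eq, loop2_getD _ _ hc1]
  have hc2 : ∀ j, m2.contains j = true ↔ j ∈ nums1 ∨ j ∈ nums2 := by
    intro j
    rw [PySem.Dict.contains_iff_mem_keys, hk2, PySem.Set.mem_ofList, List.mem_append]
  have hv3 : ∀ k, m3.getD k 0
      = if k ∈ nums3 ∧ m2.contains k = true then -1 else m2.getD k 0 := by
    intro k; rw [hm3, loop3_getD]
  -- output of A as a filter over the keys
  have hitems : m3.items = m3.keys.map (fun k => (k, m3.getD k 0)) :=
    PySem.Dict.items_eq_map_keys m3 hnd3 0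
  rw [PySem.List.foldl_append_if (p := fun kv : Int × Int => kv.2 == -1)
      (f := fun kv : Int × Int => kv.1), hitems, hk3]
  simp only [List.nil_append, List.filter_map, List.map_map, Function.comp_def,
    List.map_id', PySem.List.dedup_eq_ofList]
  -- pointwise agreement of the two filter predicates on the key list
  apply List.filter_congr
  intro k hk
  have hkmem : k ∈ nums1 ∨ k ∈ nums2 := by
    rw [PySem.Set.mem_ofList, List.mem_append] at hk; exact hk
  rw [hv3, hv2, hv1]
  simp only [PySem.Set.mem_ofList]
  rcases hkmem with h | h <;>
    by_cases h1 : k ∈ nums1 <;> by_cases h2 : k ∈ nums2 <;> by_cases h3 : k ∈ nums3 <;>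
      simp_all [pvStep2]
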